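-- pv_equiv track=rewrite | github.com/zadorian/SEARCH_ENGINEER | BACKEND/modules/brute/brute.py | _get_engine_timeout
-- ===== SOURCE A (Python) =====
-- ENGINE_PERFORMANCE = {
--     'fast': ['GO', 'BI', 'BR', 'EX', 'DD', 'YA', 'SS', 'OA', 'CR', 'OL', 'PM', 'AX', 'SE', 'WP', 'BK', 'YO'],     # 30 second timeout - Yandex & SocialSearcher moved to fast tier, You.com added
--     'medium': ['GD', 'AL', 'PW', 'GR', 'NA', 'HF', 'GU', 'W', 'NT', 'JS', 'MU', 'SG', 'AA', 'LG', 'BA', 'QW'],   # 60 second timeout - Academic scraping engines, book repos, Baidu, Qwant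
--     'slow': ['AR', 'YE']      # 120 second timeout - Only truly slow engines (BO removed - disabled stub)
-- }
--
-- def _get_engine_timeout(engine_code: str) -> int:
--     """Get timeout for engine based on performance category - OPTIMIZED FOR STREAMING"""
--     # Aggressive timeouts for faster streaming response
--     for category, engines in ENGINE_PERFORMANCE.items():
--         if engine_code in engines:
--             if category == 'fast':
--                 return 15  # Reduced from 30s for faster feedback
--             elif category == 'medium':
--                 return 30  # Reduced from 60s
--             else:  # slow
--                 return 45  # Reduced from 120s to prevent long hangs
--     return 15  # Aggressive default timeout
-- ===== SOURCE B (Python) =====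
-- _ENGINE_TIMEOUTS = {
--     'GO': 15, 'BI': 15, 'BR': 15, 'EX': 15, 'DD': 15, 'YA': 15, 'SS': 15, 'OA': 15,
--     'CR': 15, 'OL': 15, 'PM': 15, 'AX': 15, 'SE': 15, 'WP': 15, 'BK': 15, 'YO': 15,
--     'GD': 30, 'AL': 30, 'PW': 30, 'GR': 30, 'NA': 30, 'HF': 30, 'GU': 30, 'W': 30,
--     'NT': 30, 'JS': 30, 'MU': 30, 'SG': 30, 'AA': 30, 'LG': 30, 'BA': 30, 'QW': 30,
--     'AR': 45, 'YE': 45,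
-- }
--
-- def _get_engine_timeout(engine_code: str) -> int:
--     """Get timeout for engine via a flat code->timeout table (default 15)."""
--     return _ENGINE_TIMEOUTS.get(engine_code, 15)
-- ===== Notes on version B (the rewrite author's own statement) =====
-- stated objective: simpler
-- what changed: Replaced the loop over performance categories with membership tests and category-name branches by a single flat code->timeout dict lookup with default 15.
import Mathlib
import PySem

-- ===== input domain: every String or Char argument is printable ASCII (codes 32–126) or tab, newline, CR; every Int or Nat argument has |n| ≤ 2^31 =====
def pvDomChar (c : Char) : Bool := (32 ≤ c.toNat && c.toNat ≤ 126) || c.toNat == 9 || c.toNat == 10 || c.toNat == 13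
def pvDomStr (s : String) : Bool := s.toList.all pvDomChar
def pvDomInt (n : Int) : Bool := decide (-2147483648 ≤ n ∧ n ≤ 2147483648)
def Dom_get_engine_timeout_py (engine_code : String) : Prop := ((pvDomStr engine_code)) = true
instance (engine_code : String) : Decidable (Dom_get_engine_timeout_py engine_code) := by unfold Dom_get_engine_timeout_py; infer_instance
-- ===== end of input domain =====

-- B replaces A's category loop + membership tests by one flat code->timeout dict lookup (objective: simpler).

-- ===== PORT A =====
def ENGINE_PERFORMANCE : PySem.Dict String (List String) :=
  PySem.Dict.ofList
    [("fast",   ["GO","BI","BR","EX","DD","YA","SS","OA","CR","OL","PM","AX","SE","WP","BK","YO"]),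
     ("medium", ["GD","AL","PW","GR","NA","HF","GU","W","NT","JS","MU","SG","AA","LG","BA","QW"]),
     ("slow",   ["AR","YE"])]

-- the 'for category, engines in ENGINE_PERFORMANCE.items():' loop of A
def timeoutLoopA (engine_code : String) : List (String × List String) → Int
  | [] => 15
  | (category, engines) :: rest =>
    if engine_code ∈ engines then
      if category == "fast" then 15
      else if category == "medium" then 30
      else 45
    else timeoutLoopA engine_code rest

def get_engine_timeout_py (engine_code : String) : Int :=
  timeoutLoopA engine_code ENGINE_PERFORMANCE.items

-- ===== PORT B =====
def ENGINE_TIMEOUTS : PySem.Dict String Int :=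
  PySem.Dict.ofList
    [("GO",15),("BI",15),("BR",15),("EX",15),("DD",15),("YA",15),("SS",15),("OA",15),
     ("CR",15),("OL",15),("PM",15),("AX",15),("SE",15),("WP",15),("BK",15),("YO",15),
     ("GD",30),("AL",30),("PW",30),("GR",30),("NA",30),("HF",30),("GU",30),("W",30),
     ("NT",30),("JS",30),("MU",30),("SG",30),("AA",30),("LG",30),("BA",30),("QW",30),
     ("AR",45),("YE",45)]

def get_engine_timeout_py_alt (engine_code : String) : Int :=
  ENGINE_TIMEOUTS.getD engine_code 15

-- ===== PRECONDITION & SPEC =====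
def Spec_get_engine_timeout_py (engine_code : String) (out : Int) : Prop := out = get_engine_timeout_py_alt engine_code
instance (engine_code : String) (out : Int) : Decidable (Spec_get_engine_timeout_py engine_code out) := by unfold Spec_get_engine_timeout_py; infer_instance

-- ===== CLAIM (what is proved, stated in full; the proofs are below) =====
def Claim_equal_get_engine_timeout_py : Prop := ∀ (engine_code : String), Dom_get_engine_timeout_py engine_code → Spec_get_engine_timeout_py engine_code (get_engine_timeout_py engine_code)

-- ===== LEMMAS AND PROOFS =====

-- ===== VERDICT (by name: the statement is the Claim_ definition above) =====
set_option maxRecDepth 20000 in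
set_option maxHeartbeats 2000000 in
theorem get_engine_timeout_py_spec : Claim_equal_get_engine_timeout_py := by
  intro s _
  unfold Spec_get_engine_timeout_py get_engine_timeout_py get_engine_timeout_py_alt
  by_cases hmem : s ∈ ["GO","BI","BR","EX","DD","YA","SS","OA","CR","OL","PM","AX","SE","WP","BK","YO","GD","AL","PW","GR","NA","HF","GU","W","NT","JS","MU","SG","AA","LG","BA","QW","AR","YE"]
  · fin_cases hmem <;> decide
  · have hP : ENGINE_PERFORMANCE.items =
        [("fast",   ["GO","BI","BR","EX","DD","YA","SS","OA","CR","OL","PM","AX","SE","WP","BK","YO"]),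
         ("medium", ["GD","AL","PW","GR","NA","HF","GU","W","NT","JS","MU","SG","AA","LG","BA","QW"]),
         ("slow",   ["AR","YE"])] := by decide
    have hT : ENGINE_TIMEOUTS = PySem.Dict.mk
        [("GO",15),("BI",15),("BR",15),("EX",15),("DD",15),("YA",15),("SS",15),("OA",15),
         ("CR",15),("OL",15),("PM",15),("AX",15),("SE",15),("WP",15),("BK",15),("YO",15),
         ("GD",30),("AL",30),("PW",30),("GR",30),("NA",30),("HF",30),("GU",30),("W",30),
         ("NT",30),("JS",30),("MU",30),("SG",30),("AA",30),("LG",30),("BA",30),("QW",30),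
         ("AR",45),("YE",45)] := by decide
    simp only [List.mem_cons, List.not_mem_nil, or_false, not_or] at hmem
    obtain ⟨h1,h2,h3,h4,h5,h6,h7,h8,h9,h10,h11,h12,h13,h14,h15,h16,h17,h18,h19,h20,h21,h22,h23,h24,h25,h26,h27,h28,h29,h30,h31,h32,h33,h34⟩ := hmem
    rw [hP, hT]
    simp only [timeoutLoopA, PySem.Dict.getD_eq_get?_getD, PySem.Dict.get?_mk_cons,
      List.mem_cons, List.not_mem_nil, or_false]
    simp [PySem.Dict.get?, h1,h2,h3,h4,h5,h6,h7,h8,h9,h10,h11,h12,h13,h14,h15,h16,h17,h18,h19,h20,h21,h22,h23,h24,h25,h26,h27,h28,h29,h30,h31,h32,h33,h34,Ne.symm h1,Ne.symm h2,Ne.symm h3,Ne.symm h4,Ne.symm h5,Ne.symm h6,Ne.symm h7,Ne.symm h8,Ne.symm h9,Ne.symm h10,Ne.symm h11,Ne.symm h12,Ne.symm h13,Ne.symm h14,Ne.symm h15,Ne.symm h16,Ne.symm h17,Ne.symm h18,Ne.symm h19,Ne.symm h20,Ne.symm h21,Ne.symm h22,Ne.symm h23,Ne.symm h24,Ne.symm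 h25,Ne.symm h26,Ne.symm h27,Ne.symm h28,Ne.symm h29,Ne.symm h30,Ne.symm h31,Ne.symm h32,Ne.symm h33,Ne.symm h34]
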